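-- pv_equiv track=rewrite | github.com/DenisPGH/Python_algorithms_course | tasks/2_lection_graph/upr_2_3_salary.py | calc_salary_from_children
-- ===== SOURCE A (Python) =====
-- def calc_salary_from_children(node,graph,salaries):
--     if salaries[node] is not None:
--         return salaries[node]
--     salary=0
--     if graph[node]==[]:
--         return 1
--     for child in graph[node]:
--         salary+=calc_salary_from_children(child,graph,salaries)
--
--     salaries[node]=salary
--     return salary
-- ===== SOURCE B (Python) =====
-- def calc_salary_from_children(node, graph, salaries):
--     # Iterative post-order DFS with an explicit stack of tagged frames
--     # (tag 0 = enter a node, tag 1 = combine a child's result), replacing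
--     # A's recursion; performs the same memo writes to `salaries`.
--     stack = [(0, node, 0, [])]
--     ret = 0
--     while stack:
--         tag, n, acc, pending = stack.pop()
--         if tag == 0:
--             cached = salaries[n]
--             if cached is not None:
--                 ret = cached
--             else:
--                 children = graph[n]
--                 if children == []:
--                     ret = 1
--                 else:
--                     stack.append((1, n, 0, children[1:]))
--                     stack.append((0, children[0], 0, []))
--         else:
--             acc += ret
--             if pending:
--                 stack.append((1, n, acc, pending[1:]))
--                 stack.append((0, pending[0], 0, []))
--             else:
--                 salaries[n] = acc
--                 ret = acc
--     return ret
-- ===== Notes on version B (the rewrite author's own statement) =====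
-- stated objective: alternative
-- what changed: Replaces A's recursion by an iterative post-order DFS over an explicit stack of tagged (enter/combine) frames with a value register, performing the same memo writes to salaries.
import Mathlib
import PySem

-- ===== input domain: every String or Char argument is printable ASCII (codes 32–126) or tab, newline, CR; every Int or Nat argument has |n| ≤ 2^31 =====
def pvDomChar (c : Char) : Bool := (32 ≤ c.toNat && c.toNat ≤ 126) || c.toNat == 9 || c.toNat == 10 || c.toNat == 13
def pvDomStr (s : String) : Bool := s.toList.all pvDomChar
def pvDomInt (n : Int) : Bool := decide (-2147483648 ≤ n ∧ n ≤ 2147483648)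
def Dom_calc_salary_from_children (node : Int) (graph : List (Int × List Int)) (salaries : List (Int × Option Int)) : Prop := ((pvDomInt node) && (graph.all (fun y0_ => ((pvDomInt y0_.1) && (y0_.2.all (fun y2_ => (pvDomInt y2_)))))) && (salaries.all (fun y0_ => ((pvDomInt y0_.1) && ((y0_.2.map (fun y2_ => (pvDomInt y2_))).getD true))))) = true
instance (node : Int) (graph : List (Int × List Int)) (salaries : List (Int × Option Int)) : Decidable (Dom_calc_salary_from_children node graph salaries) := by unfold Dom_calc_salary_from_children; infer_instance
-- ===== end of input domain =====

-- B replaces A's recursion by an iterative post-order DFS over an explicit stack of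
-- tagged frames (same memo writes to `salaries`; equivalence proved about the return
-- value, and both programs perform the identical in-place updates of `salaries`).

-- ===== PORT A =====
-- Fuel large enough for any terminating run of A (each memoised body runs at most once);
-- inputs on which Python A raises (KeyError) or diverges (RecursionError on a cycle of
-- uncached nodes) are excluded by Pre_ below; there the port returns the default 0.
def pvFuel (graph : List (Int × List Int)) (salaries : List (Int × Option Int)) : Nat :=
  2 * (2 + salaries.length + graph.foldl (fun a p => a + 2 + p.2.length) 0)

mutual
-- literal recursion of A: memo check, leaf check, loop summing children, memo write
def pvGoA (fuel : Nat) (n : Int) (g : PySem.Dict Int (List Int))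
    (s : PySem.Dict Int (Option Int)) : Option (Int × PySem.Dict Int (Option Int)) :=
  match fuel with
  | 0 => none
  | f + 1 =>
    match s.get? n with
    | none => none                       -- KeyError on salaries[node]
    | some (some v) => some (v, s)       -- salaries[node] is not None
    | some none =>
      match g.get? n with
      | none => none                     -- KeyError on graph[node]
      | some [] => some (1, s)           -- leaf: return 1 uncached
      | some (c :: cs) =>
        match pvGoAFor f (c :: cs) g s with
        | none => none
        | some (sal, s') => some (sal, s'.insert n (some sal))   -- salaries[node] = salary
  termination_by fuel
-- the 'for child in graph[node]: salary += …' loop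
def pvGoAFor (fuel : Nat) (cs : List Int) (g : PySem.Dict Int (List Int))
    (s : PySem.Dict Int (Option Int)) : Option (Int × PySem.Dict Int (Option Int)) :=
  match fuel, cs with
  | _, [] => some (0, s)
  | 0, _ :: _ => none
  | f + 1, c :: rest =>
    match pvGoA f c g s with
    | none => none
    | some (v, s') =>
      match pvGoAFor f rest g s' with
      | none => none
      | some (v2, s'') => some (v + v2, s'')
  termination_by fuel
end

def calc_salary_from_children (node : Int) (graph : List (Int × List Int)) (salaries : List (Int × Option Int)) : Int :=
  match pvGoA (pvFuel graph salaries) node (PySem.Dict.mk graph) (PySem.Dict.mk salaries) with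
  | some (v, _) => v
  | none => 0

-- ===== PORT B =====
-- stack frame: (tag 0, n) = enter node n; (tag 1, n, acc, pending) = combine a child's
-- result into acc for node n, with `pending` children still to visit.  Each frame carries
-- its fuel (the totalization of Source B's unbounded 'while stack' loop).
inductive pvFrame where
  | call : Nat → Int → pvFrame
  | comb : Nat → Int → Int → List Int → pvFrame
deriving DecidableEq, Repr

def pvWeight : pvFrame → Nat
  | .call f _ => 3 ^ f
  | .comb f _ _ _ => 3 ^ f + 1

def pvStackW (k : List pvFrame) : Nat := (k.map pvWeight).sum

-- Source B's while loop: pop a frame, branch on its tag; `ret` is the value register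
def pvRunM (g : PySem.Dict Int (List Int)) (stack : List pvFrame) (ret : Int)
    (s : PySem.Dict Int (Option Int)) : Option (Int × PySem.Dict Int (Option Int)) :=
  match stack with
  | [] => some (ret, s)
  | .call 0 _ :: _ => none
  | .call (f + 1) n :: k =>
    match s.get? n with
    | none => none                        -- KeyError on salaries[n]
    | some (some v) => pvRunM g k v s     -- cached: ret = cached
    | some none =>
      match g.get? n with
      | none => none                      -- KeyError on graph[n]
      | some [] => pvRunM g k 1 s         -- leaf: ret = 1
      | some (c :: cs) =>
        match f with
        | 0 => none
        | f' + 1 => pvRunM g (.call f' c :: .comb f' n 0 cs :: k) ret s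
  | .comb f n acc [] :: k =>
      pvRunM g k (acc + ret) (s.insert n (some (acc + ret)))   -- salaries[n] = acc; ret = acc
  | .comb 0 _ _ (_ :: _) :: _ => none
  | .comb (f + 1) n acc (c :: cs) :: k =>
      pvRunM g (.call f c :: .comb f n (acc + ret) cs :: k) ret s
termination_by pvStackW stack
decreasing_by
  all_goals simp only [pvStackW, pvWeight, List.map_cons, List.sum_cons, pow_succ]
  all_goals (try have hf : 0 < 3 ^ f := pow_pos (by norm_num) f)
  all_goals (try have hf' : 0 < 3 ^ f' := pow_pos (by norm_num) f')
  all_goals omega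

def calc_salary_from_children_alt (node : Int) (graph : List (Int × List Int)) (salaries : List (Int × Option Int)) : Int :=
  match pvRunM (PySem.Dict.mk graph) [.call (pvFuel graph salaries) node] 0 (PySem.Dict.mk salaries) with
  | some (v, _) => v
  | none => 0

-- ===== PRECONDITION & SPEC =====
-- Pre_ holds exactly where Python A returns normally: every node reachable from `node`
-- through initially-uncached nodes has its `salaries` key (and its `graph` key when
-- uncached), and no cycle of uncached internal nodes is reachable (else A raises
-- KeyError resp. RecursionError).  It is a reachability/acyclicity condition on the
-- input graphs only; the equality proof below actually holds on all of Dom.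
def pvExpand (graph : List (Int × List Int)) (salaries : List (Int × Option Int)) (S : List Int) : List Int :=
  S.foldl (fun acc n =>
    match (PySem.Dict.mk salaries).get? n, (PySem.Dict.mk graph).get? n with
    | some none, some cs => cs.foldl (fun a c => if c ∈ a then a else a ++ [c]) acc
    | _, _ => acc) S

def pvClosure (node : Int) (graph : List (Int × List Int)) (salaries : List (Int × Option Int)) : List Int :=
  (pvExpand graph salaries)^[graph.length + 1] [node]

def pvActive (graph : List (Int × List Int)) (salaries : List (Int × Option Int)) (n : Int) : Bool :=
  match (PySem.Dict.mk salaries).get? n, (PySem.Dict.mk graph).get? n with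
  | some none, some (_ :: _) => true
  | _, _ => false

def pvPeel (graph : List (Int × List Int)) (T : List Int) : List Int :=
  T.filter (fun n => ((PySem.Dict.mk graph).getD n []).any (· ∈ T))

def pvPreCheck (node : Int) (graph : List (Int × List Int)) (salaries : List (Int × Option Int)) : Bool :=
  let clo := pvClosure node graph salaries
  (clo.all (fun n =>
    match (PySem.Dict.mk salaries).get? n with
    | none => false
    | some (some _) => true
    | some none => ((PySem.Dict.mk graph).get? n).isSome)) &&
  (let T := clo.filter (pvActive graph salaries)
   (pvPeel graph)^[T.length] T == [])

def Pre_calc_salary_from_children (node : Int) (graph : List (Int × List Int)) (salaries : List (Int × Option Int)) : Prop :=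
  pvPreCheck node graph salaries = true
instance (node : Int) (graph : List (Int × List Int)) (salaries : List (Int × Option Int)) : Decidable (Pre_calc_salary_from_children node graph salaries) := by unfold Pre_calc_salary_from_children; infer_instance

def pvWitness_calc_salary_from_children : Int × (List (Int × List Int)) × (List (Int × Option Int)) :=
  (1, [(1, [2, 3]), (2, []), (3, [2])], [(1, none), (2, none), (3, none)])

def Spec_calc_salary_from_children (node : Int) (graph : List (Int × List Int)) (salaries : List (Int × Option Int)) (out : Int) : Prop := out = calc_salary_from_children_alt node graph salaries
instance (node : Int) (graph : List (Int × List Int)) (salaries : List (Int × Option Int)) (out : Int) : Decidable (Spec_calc_salary_from_children node graph salaries out) := by unfold Spec_calc_salary_from_children; infer_instance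

-- ===== CLAIM (what is proved, stated in full; the proofs are below) =====
def Claim_equal_calc_salary_from_children : Prop := ∀ (node : Int) (graph : List (Int × List Int)) (salaries : List (Int × Option Int)), Dom_calc_salary_from_children node graph salaries → Pre_calc_salary_from_children node graph salaries → Spec_calc_salary_from_children node graph salaries (calc_salary_from_children node graph salaries)

-- ===== LEMMAS AND PROOFS =====

-- Bisimulation: running the machine from a `call` (resp. `comb`) frame is exactly
-- running A's recursion (resp. A's child loop) and then continuing with the rest
-- of the stack.  Joint strong induction on the frame's fuel.
theorem pvRun_bisim (g : PySem.Dict Int (List Int)) (f : Nat) :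
    (∀ (n : Int) (k : List pvFrame) (ret : Int) (s : PySem.Dict Int (Option Int)),
      pvRunM g (.call f n :: k) ret s =
        match pvGoA f n g s with
        | none => none
        | some (v, s') => pvRunM g k v s') ∧
    (∀ (cs : List Int) (n : Int) (acc : Int) (k : List pvFrame) (ret : Int)
        (s : PySem.Dict Int (Option Int)),
      pvRunM g (.comb f n acc cs :: k) ret s =
        match pvGoAFor f cs g s with
        | none => none
        | some (v, s') =>
            pvRunM g k (acc + ret + v) (s'.insert n (some (acc + ret + v)))) := by
  induction f using Nat.strong_induction_on with
  | _ f ih =>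
    constructor
    · intro n k ret s
      match f with
      | 0 => simp [pvRunM, pvGoA]
      | f + 1 =>
        rw [pvGoA, pvRunM]
        cases hs : s.get? n with
        | none => simp
        | some o =>
          cases o with
          | some v => simp
          | none =>
            cases hg : g.get? n with
            | none => simp
            | some cs =>
              cases cs with
              | nil => simp
              | cons c cs' =>
                simp only
                match f with
                | 0 => simp [pvGoAFor]
                | f' + 1 =>
                  show pvRunM g (.call f' c :: .comb f' n 0 cs' :: k) ret s = _
                  rw [(ih f' (by omega)).1]
                  cases hc : pvGoA f' c g s with
                  | none => simp [pvGoAFor, hc]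
                  | some p =>
                    obtain ⟨v1, s1⟩ := p
                    show pvRunM g (.comb f' n 0 cs' :: k) v1 s1 = _
                    rw [(ih f' (by omega)).2]
                    simp only [pvGoAFor, hc]
                    cases hr : pvGoAFor f' cs' g s1 with
                    | none => simp
                    | some q =>
                      obtain ⟨v2, s2⟩ := q
                      simp only
                      norm_num
    · intro cs n acc k ret s
      match f, cs with
      | f, [] => simp [pvRunM, pvGoAFor]
      | 0, c :: cs' => simp [pvRunM, pvGoAFor]
      | f + 1, c :: cs' =>
        rw [pvRunM, (ih f (by omega)).1]
        cases hc : pvGoA f c g s with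
        | none => simp [pvGoAFor, hc]
        | some p =>
          obtain ⟨v1, s1⟩ := p
          show pvRunM g (.comb f n (acc + ret) cs' :: k) v1 s1 = _
          rw [(ih f (by omega)).2]
          simp only [pvGoAFor, hc]
          cases hr : pvGoAFor f cs' g s1 with
          | none => simp
          | some q =>
            obtain ⟨v2, s2⟩ := q
            simp only
            ring_nf

-- ===== VERDICT (by name: the statement is the Claim_ definition above) =====
theorem calc_salary_from_children_spec : Claim_equal_calc_salary_from_children := by
  intro node graph salaries _ _
  unfold Spec_calc_salary_from_children calc_salary_from_children calc_salary_from_children_alt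
  rw [(pvRun_bisim (PySem.Dict.mk graph) (pvFuel graph salaries)).1]
  cases h : pvGoA (pvFuel graph salaries) node (PySem.Dict.mk graph) (PySem.Dict.mk salaries) with
  | none => simp
  | some p => obtain ⟨v, s'⟩ := p; simp [pvRunM]
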